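-- pv_equiv track=rewrite | github.com/jacobandersson86/AoC2023 | day18/lavaduct_lagoon.py | calculate_positions_line
-- ===== SOURCE A (Python) =====
-- dir_ds = {
--     "R" : (1, 0),
--     "L" : (-1, 0),
--     "D" : (0, 1), # +1 eventhough down since matrix is growing downward.
--     "U" : (0, -1),
-- }
--
-- def calculate_positions_line(directions, lengths) :
--     positions = [(0, 0)]
--     for dir, l in zip(directions, lengths) :
--         ds = dir_ds[dir]
--
--         last_pos = positions[-1]
--
--         for _ in range(l):
--             lx, ly  = last_pos
--             dx, dy = ds
--             x, y = lx + dx, ly + dy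
--             positions.append((x, y))
--             last_pos = (x, y)
--
--     return positions
-- ===== SOURCE B (Python) =====
-- dir_ds = {
--     "R": (1, 0),
--     "L": (-1, 0),
--     "D": (0, 1),
--     "U": (0, -1),
-- }
--
--
-- def calculate_positions_line(directions, lengths):
--     # Phase 1: accumulate the corner vertices of the polyline.
--     corners = [(0, 0)]
--     x = y = 0
--     for d, l in zip(directions, lengths):
--         dx, dy = dir_ds[d]
--         x, y = x + dx * l, y + dy * l
--         corners.append((x, y))
--     # Phase 2: fill each segment with unit steps, each corner included once.
--     positions = [(0, 0)]
--     px, py = 0, 0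
--     for cx, cy in corners[1:]:
--         sx = (px < cx) - (cx < px)
--         sy = (py < cy) - (cy < py)
--         n = abs(cx - px) + abs(cy - py)
--         for i in range(1, n + 1):
--             positions.append((px + sx * i, py + sy * i))
--         px, py = cx, cy
--     return positions
-- ===== Notes on version B (the rewrite author's own statement) =====
-- stated objective: alternative
-- what changed: B first accumulates the corner vertices of the polyline (one signed displacement per instruction) and then, in a second pass, fills each segment with unit steps from the previous corner, instead of A's walk that appends unit steps while reading the growing list's last element; Pre_ excludes directions outside the four dict keys (A raises KeyError) and negative lengths, an unspecified corner where A's range() silently skips the instruction while B's geometric fill walks backwards.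
-- outside the precondition, e.g. on calculate_positions_line(['R'], [-1]): A returns [(0, 0)], B returns [(0, 0), (-1, 0)]
import Mathlib
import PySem

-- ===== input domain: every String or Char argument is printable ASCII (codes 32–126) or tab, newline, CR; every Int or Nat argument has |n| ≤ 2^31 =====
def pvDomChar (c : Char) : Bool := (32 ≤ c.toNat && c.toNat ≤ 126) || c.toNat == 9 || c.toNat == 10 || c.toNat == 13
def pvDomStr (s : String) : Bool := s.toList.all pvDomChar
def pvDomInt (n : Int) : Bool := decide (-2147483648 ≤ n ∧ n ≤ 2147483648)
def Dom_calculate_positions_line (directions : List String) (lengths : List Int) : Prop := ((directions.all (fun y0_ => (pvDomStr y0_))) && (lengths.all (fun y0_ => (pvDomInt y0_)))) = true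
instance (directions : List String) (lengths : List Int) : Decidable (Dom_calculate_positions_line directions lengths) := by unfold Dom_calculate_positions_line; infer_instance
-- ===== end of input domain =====

-- B builds the corner vertices first and then fills each segment with unit steps;
-- A walks unit steps directly, reading the growing list's last element.

-- ===== PORT A =====
-- dir_ds lookup (Python dict of four literal keys)
def dirDs (dir : String) : Option (Int × Int) :=
  if dir = "R" then some (1, 0)
  else if dir = "L" then some (-1, 0)
  else if dir = "D" then some (0, 1)
  else if dir = "U" then some (0, -1)
  else none

-- inner 'for _ in range(l)' loop: appends unit steps, returns (positions, last_pos)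
def cplInner (dx dy lx ly : Int) (positions : List (Int × Int)) :
    Nat → List (Int × Int) × (Int × Int)
  | 0 => (positions, (lx, ly))
  | Nat.succ n =>
    let x := lx + dx
    let y := ly + dy
    cplInner dx dy x y (positions ++ [(x, y)]) n

-- outer 'for dir, l in zip(...)' loop
def cplLoop (positions : List (Int × Int)) : List (String × Int) → List (Int × Int)
  | [] => positions
  | (dir, l) :: rest =>
    match dirDs dir with
    | none => cplLoop positions rest  -- Python raises KeyError here; excluded by Pre_
    | some (dx, dy) =>
      let last := positions.getLastD (0, 0)  -- positions[-1]; the list is never empty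
      cplLoop (cplInner dx dy last.1 last.2 positions l.toNat).1 rest

def calculate_positions_line (directions : List String) (lengths : List Int) : List (Int × Int) :=
  cplLoop [(0, 0)] (directions.zip lengths)

-- ===== PORT B =====
-- phase 1: corners appended after the initial (0,0) (Python's corners[1:])
def cplCorners (x y : Int) : List (String × Int) → List (Int × Int)
  | [] => []
  | (d, l) :: rest =>
    match dirDs d with
    | none => (x, y) :: cplCorners x y rest  -- Python raises KeyError here; excluded by Pre_
    | some (dx, dy) =>
      (x + dx * l, y + dy * l) :: cplCorners (x + dx * l) (y + dy * l) rest

-- phase 2: fill each segment with unit steps from the previous corner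
def cplFill (px py : Int) (positions : List (Int × Int)) :
    List (Int × Int) → List (Int × Int)
  | [] => positions
  | (cx, cy) :: rest =>
    let sx : Int := (if px < cx then 1 else 0) - (if cx < px then 1 else 0)
    let sy : Int := (if py < cy then 1 else 0) - (if cy < py then 1 else 0)
    let n : Nat := (cx - px).natAbs + (cy - py).natAbs
    cplFill cx cy
      (positions ++ (List.range' 1 n).map (fun (i : Nat) => (px + sx * i, py + sy * i))) rest

def calculate_positions_line_alt (directions : List String) (lengths : List Int) : List (Int × Int) :=
  let corners := (0, 0) :: cplCorners 0 0 (directions.zip lengths)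
  cplFill 0 0 [(0, 0)] (corners.drop 1)

-- ===== PRECONDITION & SPEC =====
-- Pre_ excludes the inputs where Python A raises KeyError (a zipped direction outside
-- the four dict keys) and negative zipped lengths, an unspecified corner where A's
-- range() silently skips the instruction while B's geometric fill walks backwards.
def Pre_calculate_positions_line (directions : List String) (lengths : List Int) : Prop :=
  ∀ p ∈ directions.zip lengths,
    (p.1 = "R" ∨ p.1 = "L" ∨ p.1 = "D" ∨ p.1 = "U") ∧ 0 ≤ p.2
instance (directions : List String) (lengths : List Int) : Decidable (Pre_calculate_positions_line directions lengths) := by unfold Pre_calculate_positions_line; infer_instance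

def pvWitness_calculate_positions_line : List String × List Int := (["R", "D", "L"], [2, 1, 3])

def Spec_calculate_positions_line (directions : List String) (lengths : List Int) (out : List (Int × Int)) : Prop := out = calculate_positions_line_alt directions lengths
instance (directions : List String) (lengths : List Int) (out : List (Int × Int)) : Decidable (Spec_calculate_positions_line directions lengths out) := by unfold Spec_calculate_positions_line; infer_instance

-- ===== CLAIM (what is proved, stated in full; the proofs are below) =====
def Claim_equal_calculate_positions_line : Prop := ∀ (directions : List String) (lengths : List Int), Dom_calculate_positions_line directions lengths → Pre_calculate_positions_line directions lengths → Spec_calculate_positions_line directions lengths (calculate_positions_line directions lengths)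

-- ===== LEMMAS AND PROOFS =====

theorem cplInner_eq (n : Nat) : ∀ (dx dy x y : Int) (pos : List (Int × Int)),
    cplInner dx dy x y pos n =
      (pos ++ (List.range' 1 n).map (fun (i : Nat) => (x + dx * i, y + dy * i)),
        (x + dx * n, y + dy * n)) := by
  induction n with
  | zero => intro dx dy x y pos; simp [cplInner]
  | succ m ih =>
    intro dx dy x y pos
    simp only [cplInner, ih, List.range'_succ, List.map_cons, List.append_assoc,
      List.cons_append, List.nil_append, Prod.mk.injEq, List.append_right_inj,
      List.cons.injEq]
    refine ⟨⟨⟨by push_cast; ring, by push_cast; ring⟩, ?_⟩, by push_cast; ring,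
      by push_cast; ring⟩
    simp only [List.range'_eq_map_range, List.map_map]
    apply List.map_congr_left
    intro i _
    simp only [Function.comp_apply, Prod.mk.injEq]
    push_cast
    constructor <;> ring

theorem step_pos (rest : List (String × Int))
    (ih : ∀ (x y : Int) (acc : List (Int × Int)),
      cplLoop (acc ++ [(x, y)]) rest = cplFill x y (acc ++ [(x, y)]) (cplCorners x y rest))
    (dx dy x y l : Int) (hl : 0 < l) (acc : List (Int × Int)) :
    cplLoop (cplInner dx dy x y (acc ++ [(x, y)]) l.toNat).1 rest
      = cplFill (x + dx * l) (y + dy * l)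
          ((acc ++ [(x, y)]) ++ (List.range' 1 l.toNat).map (fun (i : Nat) => (x + dx * i, y + dy * i)))
          (cplCorners (x + dx * l) (y + dy * l) rest) := by
  rw [cplInner_eq]
  obtain ⟨m, hm⟩ : ∃ m, l.toNat = m + 1 := ⟨l.toNat - 1, by omega⟩
  have hcast : (l.toNat : Int) = l := Int.toNat_of_nonneg (le_of_lt hl)
  have hc : ((1 + 1 * m : Nat) : Int) = l := by push_cast; omega
  have hseg : (acc ++ [(x, y)]) ++ (List.range' 1 l.toNat).map (fun (i : Nat) => (x + dx * i, y + dy * i))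
      = (acc ++ (x, y) :: (List.range' 1 m).map (fun (i : Nat) => (x + dx * i, y + dy * i)))
        ++ [(x + dx * l, y + dy * l)] := by
    rw [hm, List.range'_concat, List.map_append]
    simp only [List.map_cons, List.map_nil, List.append_assoc, List.cons_append,
      List.nil_append, hc]
  rw [hseg, ih]

-- B's fill step on a positive axis-aligned segment recovers the unit-step list
theorem fill_cons_pos (dx dy x y l : Int) (hl : 0 < l)
    (hd : (dx = 1 ∧ dy = 0) ∨ (dx = -1 ∧ dy = 0) ∨ (dx = 0 ∧ dy = 1) ∨ (dx = 0 ∧ dy = -1))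
    (pos : List (Int × Int)) (cs : List (Int × Int)) :
    cplFill x y pos ((x + dx * l, y + dy * l) :: cs)
      = cplFill (x + dx * l) (y + dy * l)
          (pos ++ (List.range' 1 l.toNat).map (fun (i : Nat) => (x + dx * i, y + dy * i))) cs := by
  simp only [cplFill]
  have hsx : ((if x < x + dx * l then (1:Int) else 0) - if x + dx * l < x then (1:Int) else 0) = dx := by
    rcases hd with ⟨h1, h2⟩ | ⟨h1, h2⟩ | ⟨h1, h2⟩ | ⟨h1, h2⟩ <;> subst h1 <;> subst h2 <;>
      split_ifs <;> omega
  have hsy : ((if y < y + dy * l then (1:Int) else 0) - if y + dy * l < y then (1:Int) else 0) = dy := by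
    rcases hd with ⟨h1, h2⟩ | ⟨h1, h2⟩ | ⟨h1, h2⟩ | ⟨h1, h2⟩ <;> subst h1 <;> subst h2 <;>
      split_ifs <;> omega
  have hn : (x + dx * l - x).natAbs + (y + dy * l - y).natAbs = l.toNat := by
    rcases hd with ⟨h1, h2⟩ | ⟨h1, h2⟩ | ⟨h1, h2⟩ | ⟨h1, h2⟩ <;> subst h1 <;> subst h2 <;> omega
  rw [hsx, hsy, hn]

theorem dirDs_cases (d : String) (dx dy : Int) (h : dirDs d = some (dx, dy)) :
    (dx = 1 ∧ dy = 0) ∨ (dx = -1 ∧ dy = 0) ∨ (dx = 0 ∧ dy = 1) ∨ (dx = 0 ∧ dy = -1) := by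
  unfold dirDs at h
  split_ifs at h <;> simp only [Option.some.injEq, Prod.mk.injEq] at h <;> tauto

theorem main_lemma (pairs : List (String × Int)) (hpos : ∀ p ∈ pairs, 0 ≤ p.2) :
    ∀ (x y : Int) (acc : List (Int × Int)),
    cplLoop (acc ++ [(x, y)]) pairs = cplFill x y (acc ++ [(x, y)]) (cplCorners x y pairs) := by
  induction pairs with
  | nil => intro x y acc; simp [cplLoop, cplCorners, cplFill]
  | cons hd rest ih =>
    intro x y acc
    obtain ⟨d, l⟩ := hd
    have hrest : ∀ p ∈ rest, 0 ≤ p.2 := fun p hp => hpos p (List.mem_cons_of_mem _ hp)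
    rcases h : dirDs d with _ | ⟨dx, dy⟩
    · -- unknown direction: both sides leave the state unchanged
      simp only [cplLoop, cplCorners, h, cplFill, sub_self, lt_self_iff_false, if_false,
        Int.natAbs_zero, Nat.add_zero, List.range'_zero, List.map_nil, List.append_nil]
      exact ih hrest x y acc
    · simp only [cplLoop, cplCorners, h, List.getLastD_concat]
      have hl0 : 0 ≤ l := hpos (d, l) (List.mem_cons_self)
      rcases lt_or_eq_of_le hl0 with hl | hl
      · rw [fill_cons_pos dx dy x y l hl (dirDs_cases d dx dy h)]
        exact step_pos rest (ih hrest) dx dy x y l hl acc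
      · subst hl
        simp only [Int.toNat_zero, cplInner, mul_zero, add_zero, cplFill, sub_self,
          lt_self_iff_false, if_false, Int.natAbs_zero, List.range'_zero,
          List.map_nil, List.append_nil]
        exact ih hrest x y acc

-- ===== VERDICT (by name: the statement is the Claim_ definition above) =====
theorem calculate_positions_line_spec : Claim_equal_calculate_positions_line := by
  intro directions lengths _ hpre
  unfold Spec_calculate_positions_line calculate_positions_line calculate_positions_line_alt
  simpa using main_lemma (directions.zip lengths) (fun p hp => (hpre p hp).2) 0 0 []
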